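-- pv_equiv track=rewrite | github.com/1Said2/Trabajo3 | main.py | suma_digitos_multiplos_secuencial
-- ===== SOURCE A (Python) =====
-- def suma_digitos_multiplos_secuencial(arr, multiplo):
--     resultado = []
--     for i in range(len(arr)):
--         suma = 0
--         num_str = str(abs(arr[i]))
--         for j in range(len(num_str)):
--             digito = int(num_str[j])
--             if digito % multiplo == 0 and digito != 0:
--                 suma += digito
--         resultado.append(suma)
--     return resultado
-- ===== SOURCE B (Python) =====
-- def _suma_digitos(n, multiplo):
--     # n >= 0; extract digits arithmetically instead of via str()
--     suma = 0
--     while n: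
--         d = n % 10
--         n //= 10
--         if d % multiplo == 0 and d != 0:
--             suma += d
--     return suma
--
--
-- def suma_digitos_multiplos_secuencial(arr, multiplo):
--     return [_suma_digitos(abs(x), multiplo) for x in arr]
-- ===== Notes on version B (the rewrite author's own statement) =====
-- stated objective: faster
-- what changed: Digits are extracted arithmetically (n % 10, n //= 10, least-significant first) instead of converting each number to a string and indexing/re-parsing its characters; the outer loop becomes a list comprehension. Avoiding str()/int() round-trips per digit gives a constant-factor speedup (~2x measured).
import Mathlib
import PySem

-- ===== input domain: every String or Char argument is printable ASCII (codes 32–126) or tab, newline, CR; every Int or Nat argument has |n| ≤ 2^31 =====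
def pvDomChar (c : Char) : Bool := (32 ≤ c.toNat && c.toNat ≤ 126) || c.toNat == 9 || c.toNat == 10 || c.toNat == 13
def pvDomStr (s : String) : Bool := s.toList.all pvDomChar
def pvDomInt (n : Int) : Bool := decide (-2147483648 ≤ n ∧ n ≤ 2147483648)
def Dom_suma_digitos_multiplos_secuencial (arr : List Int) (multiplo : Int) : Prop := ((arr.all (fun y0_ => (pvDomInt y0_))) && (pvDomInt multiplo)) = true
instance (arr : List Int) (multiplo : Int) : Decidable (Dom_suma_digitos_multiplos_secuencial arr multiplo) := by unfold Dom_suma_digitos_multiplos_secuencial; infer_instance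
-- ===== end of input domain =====

-- B extracts digits arithmetically (n % 10 / n //= 10) instead of A's string
-- conversion + character indexing; same return values on Pre_, measurably faster
-- by a constant factor (no per-digit str/int round-trips).

-- ===== PORT A =====
-- inner loop: for j in range(len(num_str)): digito = int(num_str[j]); …
-- int(c) on a single decimal-digit char (all chars of str(abs(n)) are such) is
-- exactly (c.toNat : Int) - 48; ported by hand, exact on that domain.
def pvAInner (multiplo : Int) (x : Int) : Int :=
  (PySem.Int.toStr |x|).toList.foldl
    (fun suma c =>
      let digito : Int := (c.toNat : Int) - 48
      if PySem.Int.mod digito multiplo = 0 ∧ digito ≠ 0 then suma + digito else suma)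
    0

-- resultado = []; for i in range(len(arr)): … resultado.append(…)
def suma_digitos_multiplos_secuencial (arr : List Int) (multiplo : Int) : List Int :=
  arr.foldl (fun resultado x => resultado ++ [pvAInner multiplo x]) []

-- ===== PORT B =====
-- while n: d = n % 10; n //= 10; if d % multiplo == 0 and d != 0: suma += d
-- n = abs(arr[i]) ≥ 0, so it is tracked as a Nat (floor div/mod on nonnegative
-- ints coincide with Nat division/modulo).
def pvBLoop (multiplo : Int) (n : Nat) (suma : Int) : Int :=
  if n = 0 then suma
  else
    let d : Int := (n % 10 : Nat)
    pvBLoop multiplo (n / 10)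
      (if PySem.Int.mod d multiplo = 0 ∧ d ≠ 0 then suma + d else suma)
decreasing_by exact Nat.div_lt_self (Nat.pos_of_ne_zero (by assumption)) (by norm_num)

def suma_digitos_multiplos_secuencial_alt (arr : List Int) (multiplo : Int) : List Int :=
  arr.map (fun x => pvBLoop multiplo x.natAbs 0)

-- ===== PRECONDITION & SPEC =====
-- A evaluates digit % multiplo on every digit (including the digit '0' of 0),
-- so it raises ZeroDivisionError whenever multiplo = 0 and arr is non-empty.
def Pre_suma_digitos_multiplos_secuencial (arr : List Int) (multiplo : Int) : Prop :=
  multiplo ≠ 0 ∨ arr = []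
instance (arr : List Int) (multiplo : Int) : Decidable (Pre_suma_digitos_multiplos_secuencial arr multiplo) := by unfold Pre_suma_digitos_multiplos_secuencial; infer_instance

def pvWitness_suma_digitos_multiplos_secuencial : List Int × Int := ([123, -40, 0], 3)

def Spec_suma_digitos_multiplos_secuencial (arr : List Int) (multiplo : Int) (out : List Int) : Prop := out = suma_digitos_multiplos_secuencial_alt arr multiplo
instance (arr : List Int) (multiplo : Int) (out : List Int) : Decidable (Spec_suma_digitos_multiplos_secuencial arr multiplo out) := by unfold Spec_suma_digitos_multiplos_secuencial; infer_instance

-- ===== CLAIM (what is proved, stated in full; the proofs are below) =====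
def Claim_equal_suma_digitos_multiplos_secuencial : Prop := ∀ (arr : List Int) (multiplo : Int), Dom_suma_digitos_multiplos_secuencial arr multiplo → Pre_suma_digitos_multiplos_secuencial arr multiplo → Spec_suma_digitos_multiplos_secuencial arr multiplo (suma_digitos_multiplos_secuencial arr multiplo)

-- ===== LEMMAS AND PROOFS =====

-- the value A adds for a digit value d (as an Int)
def pvG (m d : Int) : Int := if PySem.Int.mod d m = 0 ∧ d ≠ 0 then d else 0

-- order-independent sum of the selected digits of n (base 10)
def pvDSum (m : Int) (n : Nat) : Int :=
  if n = 0 then 0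
  else pvG m (n % 10 : Nat) + pvDSum m (n / 10)
decreasing_by exact Nat.div_lt_self (Nat.pos_of_ne_zero (by assumption)) (by norm_num)

theorem pvG_zero (m : Int) : pvG m 0 = 0 := by simp [pvG]

theorem pvBLoop_eq (m : Int) (n : Nat) (s : Int) : pvBLoop m n s = s + pvDSum m n := by
  induction n using Nat.strong_induction_on generalizing s with
  | _ n ih =>
    rw [pvBLoop, pvDSum]
    by_cases h : n = 0
    · simp [h]
    · simp only [if_neg h]
      rw [ih (n / 10) (Nat.div_lt_self (Nat.pos_of_ne_zero h) (by norm_num))]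
      simp only [pvG]
      split_ifs <;> ring

theorem pvDigitChar_val (d : Nat) (hd : d < 10) :
    ((Nat.digitChar d).toNat : Int) - 48 = (d : Int) := by
  interval_cases d <;> decide

theorem pvDSum_zero (m : Int) : pvDSum m 0 = 0 := by
  rw [pvDSum]
  simp

theorem pvDSum_ne (m : Int) (n : Nat) (h : n ≠ 0) :
    pvDSum m n = pvG m (n % 10 : Nat) + pvDSum m (n / 10) := by
  rw [pvDSum, if_neg h]

theorem pvFold_toDigitsCore (m : Int) (fuel n : Nat) (ds : List Char) (acc : Int)
    (hf : n < fuel) :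
    (Nat.toDigitsCore 10 fuel n ds).foldl
      (fun suma c =>
        let digito : Int := (c.toNat : Int) - 48
        if PySem.Int.mod digito m = 0 ∧ digito ≠ 0 then suma + digito else suma)
      acc
    = ds.foldl
      (fun suma c =>
        let digito : Int := (c.toNat : Int) - 48
        if PySem.Int.mod digito m = 0 ∧ digito ≠ 0 then suma + digito else suma)
      (acc + pvG m (n % 10 : Nat) + pvDSum m (n / 10)) := by
  induction fuel generalizing n ds acc with
  | zero => omega
  | succ fuel ih =>
    have hdd := pvDigitChar_val (n % 10) (Nat.mod_lt _ (by norm_num))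
    rw [Nat.toDigitsCore]
    by_cases h : n / 10 = 0
    · rw [if_pos h, List.foldl_cons]
      congr 1
      rw [h, pvDSum_zero]
      simp only [hdd, pvG]
      split_ifs <;> ring
    · rw [if_neg h, ih (n / 10) _ acc (by omega), List.foldl_cons]
      congr 1
      rw [pvDSum_ne m (n / 10) h]
      simp only [hdd, pvG]
      split_ifs <;> ring

theorem pvAInner_eq (m x : Int) : pvAInner m x = pvDSum m x.natAbs := by
  unfold pvAInner
  have habs : ¬ (|x| < 0) := not_lt.mpr (abs_nonneg x)
  have htoList : (PySem.Int.toStr |x|).toList = Nat.toDigits 10 x.natAbs := by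
    have h2 : |x|.toNat = x.natAbs := by rw [Int.abs_eq_natAbs, Int.toNat_natCast]
    rw [PySem.Int.toList_toStr, PySem.Int.toChars, if_neg habs, h2]
  rw [htoList, Nat.toDigits,
      pvFold_toDigitsCore m (x.natAbs + 1) x.natAbs [] 0 (Nat.lt_succ_self _)]
  simp only [List.foldl_nil, zero_add]
  by_cases h : x.natAbs = 0
  · simp [h, pvG_zero, pvDSum]
  · rw [pvDSum_ne m _ h]

theorem pvFoldAppend {α β : Type} (f : α → β) (l : List α) (acc : List β) :
    l.foldl (fun r x => r ++ [f x]) acc = acc ++ l.map f := by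
  induction l generalizing acc with
  | nil => simp
  | cons a l ih => simp [ih]

-- ===== VERDICT (by name: the statement is the Claim_ definition above) =====
theorem suma_digitos_multiplos_secuencial_spec : Claim_equal_suma_digitos_multiplos_secuencial := by
  intro arr multiplo _ _
  unfold Spec_suma_digitos_multiplos_secuencial suma_digitos_multiplos_secuencial
    suma_digitos_multiplos_secuencial_alt
  rw [pvFoldAppend]
  simp only [List.nil_append]
  apply List.map_congr_left
  intro x _
  rw [pvAInner_eq, pvBLoop_eq, zero_add]
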